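-- pv_equiv track=rewrite | github.com/kedrole/translator | main/yandex_translate.py | get_list_of_text_lists_with_overall_textlength_less_10000
-- ===== SOURCE A (Python) =====
-- def get_list_of_text_lists_with_overall_textlength_less_10000(text_list):
--     ''' Получить список списков текста с суммарной длиной фрагментов текста менее 10000 символов'''
--     ret_list = []
--
--     text_lenghts_sum = 0
--     last_text_ind = 0
--
--     for ind, text in enumerate(text_list):
--         text_lenghts_sum += len(text)
--         if text_lenghts_sum >= 9000:
--             ret_list.append(text_list[last_text_ind:ind])
--             last_text_ind = ind
--             text_lenghts_sum = len(text)
--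
--     ret_list.append(text_list[last_text_ind:])
--     return ret_list
-- ===== SOURCE B (Python) =====
-- def get_list_of_text_lists_with_overall_textlength_less_10000(text_list):
--     ''' Получить список списков текста с суммарной длиной фрагментов текста менее 10000 символов'''
--     ret_list = []
--     current_chunk = []
--     current_sum = 0
--     for text in text_list:
--         current_sum += len(text)
--         if current_sum >= 9000:
--             ret_list.append(current_chunk)
--             current_chunk = [text]
--             current_sum = len(text)
--         else:
--             current_chunk.append(text)
--     ret_list.append(current_chunk)
--     return ret_list
-- ===== Notes on version B (the rewrite author's own statement) =====
-- stated objective: alternative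
-- what changed: B accumulates the current chunk in an explicit list with a running sum and appends texts directly, instead of A's index bookkeeping with repeated slicing of the input list.
import Mathlib
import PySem

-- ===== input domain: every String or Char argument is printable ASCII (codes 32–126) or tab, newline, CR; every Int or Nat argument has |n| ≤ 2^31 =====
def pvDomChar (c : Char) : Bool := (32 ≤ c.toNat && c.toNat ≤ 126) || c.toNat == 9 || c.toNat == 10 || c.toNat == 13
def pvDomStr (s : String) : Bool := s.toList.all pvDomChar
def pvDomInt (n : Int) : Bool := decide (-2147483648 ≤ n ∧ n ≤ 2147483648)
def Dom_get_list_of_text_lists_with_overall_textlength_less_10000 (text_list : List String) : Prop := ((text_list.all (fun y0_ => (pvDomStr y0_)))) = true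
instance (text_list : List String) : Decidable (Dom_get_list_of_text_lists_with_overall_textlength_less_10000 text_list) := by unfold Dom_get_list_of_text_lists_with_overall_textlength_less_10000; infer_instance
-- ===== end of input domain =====

-- B replaces A's slice-by-index bookkeeping with an explicit current-chunk accumulator; alternative decomposition, same cost.

-- ===== PORT A =====
-- state: (ret_list, text_lenghts_sum, last_text_ind)
def pvStepA (text_list : List String) (st : List (List String) × Int × Int)
    (p : Int × String) : List (List String) × Int × Int :=
  let sum := st.2.1 + PySem.Str.len p.2
  if sum ≥ 9000 then
    (st.1 ++ [PySem.List.slice text_list (some st.2.2) (some p.1)], PySem.Str.len p.2, p.1)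
  else
    (st.1, sum, st.2.2)

def get_list_of_text_lists_with_overall_textlength_less_10000 (text_list : List String) : List (List String) :=
  let st := (PySem.List.enumerate text_list 0).foldl (pvStepA text_list) ([], 0, 0)
  st.1 ++ [PySem.List.slice text_list (some st.2.2) none]

-- ===== PORT B =====
-- state: (ret_list, current_chunk, current_sum)
def pvStepB (st : List (List String) × List String × Int) (text : String) :
    List (List String) × List String × Int :=
  let sum := st.2.2 + PySem.Str.len text
  if sum ≥ 9000 then
    (st.1 ++ [st.2.1], [text], PySem.Str.len text)
  else
    (st.1, st.2.1 ++ [text], sum)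

def get_list_of_text_lists_with_overall_textlength_less_10000_alt (text_list : List String) : List (List String) :=
  let st := text_list.foldl pvStepB ([], [], 0)
  st.1 ++ [st.2.1]

-- ===== PRECONDITION & SPEC =====
def Spec_get_list_of_text_lists_with_overall_textlength_less_10000 (text_list : List String) (out : List (List String)) : Prop := out = get_list_of_text_lists_with_overall_textlength_less_10000_alt text_list
instance (text_list : List String) (out : List (List String)) : Decidable (Spec_get_list_of_text_lists_with_overall_textlength_less_10000 text_list out) := by unfold Spec_get_list_of_text_lists_with_overall_textlength_less_10000; infer_instance

-- ===== CLAIM (what is proved, stated in full; the proofs are below) =====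
def Claim_equal_get_list_of_text_lists_with_overall_textlength_less_10000 : Prop := ∀ (text_list : List String), Dom_get_list_of_text_lists_with_overall_textlength_less_10000 text_list → Spec_get_list_of_text_lists_with_overall_textlength_less_10000 text_list (get_list_of_text_lists_with_overall_textlength_less_10000 text_list)

-- ===== LEMMAS AND PROOFS =====

-- Main loop invariant: folding A over the enumerated suffix starting at index k with
-- last chunk start `last` matches folding B over the suffix with current chunk
-- `(ts.drop last).take (k - last)`.
theorem pv_loop_eq (ts : List String) :
    ∀ (rest : List String) (k last : Nat), ts.drop k = rest → last ≤ k →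
    ∀ (ret : List (List String)) (sum : Int),
      (let a := (PySem.List.enumerate rest (k : Int)).foldl (pvStepA ts) (ret, sum, (last : Int));
       a.1 ++ [PySem.List.slice ts (some a.2.2) none])
      =
      (let b := rest.foldl pvStepB (ret, (ts.drop last).take (k - last), sum);
       b.1 ++ [b.2.1]) := by
  intro rest
  induction rest with
  | nil =>
    intro k last hdrop hle ret sum
    simp only [PySem.List.enumerate_nil, List.foldl_nil]
    have hlen : ts.length ≤ k := by
      have := congrArg List.length hdrop
      simp at this
      omega
    have htake : (ts.drop last).take (k - last) = ts.drop last := by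
      apply List.take_of_length_le
      simp
      omega
    rw [PySem.List.slice_from_natCast, htake]
  | cons t rest ih =>
    intro k last hdrop hle ret sum
    have hk : k < ts.length := by
      by_contra h
      rw [List.drop_eq_nil_iff.mpr (by omega)] at hdrop
      simp at hdrop
    have hcons : ts.drop k = ts[k] :: ts.drop (k + 1) := List.drop_eq_getElem_cons hk
    rw [hdrop] at hcons
    have hget : ts[k] = t := (List.cons.inj hcons.symm).1
    have hdrop' : ts.drop (k + 1) = rest := (List.cons.inj hcons.symm).2
    rw [PySem.List.enumerate_cons]
    simp only [List.foldl_cons]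
    by_cases hbr : (9000:Int) ≤ sum + (t.length : Int)
    · -- branch taken
      have hA : pvStepA ts (ret, sum, (last : Nat)) ((k : Int), t)
          = (ret ++ [PySem.List.slice ts (some (last : Int)) (some (k : Int))], PySem.Str.len t, (k : Int)) := by
        simp [pvStepA, PySem.Str.len_eq, hbr]
      have hB : pvStepB (ret, (ts.drop last).take (k - last), sum) t
          = (ret ++ [(ts.drop last).take (k - last)], [t], PySem.Str.len t) := by
        simp [pvStepB, PySem.Str.len_eq, hbr]
      rw [hA, hB]
      have hslice : PySem.List.slice ts (some (last : Int)) (some (k : Int))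
          = (ts.drop last).take (k - last) := PySem.List.slice_natCast ts last k
      have hcur : (ts.drop k).take (k + 1 - k) = [t] := by
        rw [hdrop]
        simp
      have := ih (k + 1) k hdrop' (by omega)
        (ret ++ [(ts.drop last).take (k - last)]) (PySem.Str.len t)
      rw [hcur] at this
      push_cast at this ⊢
      rw [hslice]
      exact this
    · -- branch not taken
      have hA : pvStepA ts (ret, sum, (last : Nat)) ((k : Int), t)
          = (ret, sum + PySem.Str.len t, (last : Int)) := by
        simp [pvStepA, PySem.Str.len_eq, hbr]
      have hB : pvStepB (ret, (ts.drop last).take (k - last), sum) t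
          = (ret, (ts.drop last).take (k - last) ++ [t], sum + PySem.Str.len t) := by
        simp [pvStepB, PySem.Str.len_eq, hbr]
      rw [hA, hB]
      have hcur : (ts.drop last).take (k + 1 - last) = (ts.drop last).take (k - last) ++ [t] := by
        have hlt : k - last < (ts.drop last).length := by
          simp
          omega
        have : (ts.drop last).take (k - last + 1)
            = (ts.drop last).take (k - last) ++ [(ts.drop last)[k - last]] := by
          rw [List.take_add_one]
          simp
        have hgd : (ts.drop last)[k - last]'hlt = ts[k]'hk := by
          rw [List.getElem_drop]
          congr 1
          omega
        rw [show k + 1 - last = k - last + 1 by omega, this, hgd, hget]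
      rw [← hcur]
      have := ih (k + 1) last hdrop' (by omega) ret (sum + PySem.Str.len t)
      push_cast at this ⊢
      exact this

-- ===== VERDICT (by name: the statement is the Claim_ definition above) =====
theorem get_list_of_text_lists_with_overall_textlength_less_10000_spec : Claim_equal_get_list_of_text_lists_with_overall_textlength_less_10000 := by
  intro text_list _
  show _ = _
  have h := pv_loop_eq text_list text_list 0 0 rfl (Nat.le_refl 0) [] 0
  simpa [get_list_of_text_lists_with_overall_textlength_less_10000,
    get_list_of_text_lists_with_overall_textlength_less_10000_alt] using h
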